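-- pv_equiv track=rewrite | github.com/jinha2536/mdm-arithmetic | diffusion-arithmetic/experiments/exp_countdown.py | classify_output_positions
-- ===== SOURCE A (Python) =====
-- POS_PLAN = 'plan'
--
-- POS_CALC = 'calc'
--
-- POS_SEP = 'sep'
--
-- def classify_output_positions(output_str):
--     types = []
--     steps = output_str.split(',')
--     for si, step in enumerate(steps):
--         eq_pos = step.find('=')
--         if eq_pos < 0:
--             types.extend([POS_PLAN] * len(step))
--         else:
--             types.extend([POS_PLAN] * eq_pos)
--             types.append(POS_SEP)
--             types.extend([POS_CALC] * (len(step) - eq_pos - 1))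
--         if si < len(steps) - 1:
--             types.append(POS_SEP)
--     return types
-- ===== SOURCE B (Python) =====
-- POS_PLAN = 'plan'
-- POS_CALC = 'calc'
-- POS_SEP = 'sep'
--
-- def classify_output_positions(output_str):
--     # single left-to-right scan: a comma resets the state; the first '=' of a
--     # segment is a separator; everything after it (until the next comma) is calc
--     types = []
--     seen_eq = False
--     for ch in output_str:
--         if ch == ',':
--             types.append(POS_SEP)
--             seen_eq = False
--         elif ch == '=' and not seen_eq:
--             types.append(POS_SEP)
--             seen_eq = True
--         elif seen_eq:
--             types.append(POS_CALC)
--         else: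
--             types.append(POS_PLAN)
--     return types
-- ===== Notes on version B (the rewrite author's own statement) =====
-- stated objective: simpler
-- what changed: Replaced split-on-comma plus per-segment search for the first equals sign and block extends by a single character-by-character state-machine scan with one boolean flag reset at each comma.
import Mathlib
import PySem

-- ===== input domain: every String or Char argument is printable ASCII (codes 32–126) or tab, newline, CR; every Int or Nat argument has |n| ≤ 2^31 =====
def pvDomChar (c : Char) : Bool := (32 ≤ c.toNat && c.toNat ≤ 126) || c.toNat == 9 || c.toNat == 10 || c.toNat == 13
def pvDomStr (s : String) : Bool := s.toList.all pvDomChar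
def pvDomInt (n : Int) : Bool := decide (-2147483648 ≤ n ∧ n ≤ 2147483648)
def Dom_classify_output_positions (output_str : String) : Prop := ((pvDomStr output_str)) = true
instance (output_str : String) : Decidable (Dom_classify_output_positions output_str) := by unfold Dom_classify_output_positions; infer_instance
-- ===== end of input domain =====

-- B replaces A's split-on-comma plus per-segment search by one char-by-char state-machine scan (objective: simpler).

-- ===== PORT A =====
def classify_output_positions (output_str : String) : List String :=
  let steps := PySem.Chars.splitOn output_str.toList [',']
  (PySem.List.enumerate steps 0).foldl (fun types p =>
    let si := p.1
    let step := p.2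
    let eq_pos := PySem.Chars.find step ['=']
    let types :=
      if eq_pos < 0 then types ++ List.replicate step.length "plan"
      else types ++ List.replicate eq_pos.toNat "plan" ++ ["sep"]
             ++ List.replicate (step.length - eq_pos.toNat - 1) "calc"
    if si < (steps.length : Int) - 1 then types ++ ["sep"] else types) []

-- ===== PORT B =====
def pvAltGo (seen : Bool) : List Char → List String
  | [] => []
  | c :: cs =>
    if c = ',' then "sep" :: pvAltGo false cs
    else if c = '=' ∧ seen = false then "sep" :: pvAltGo true cs
    else if seen then "calc" :: pvAltGo true cs
    else "plan" :: pvAltGo false cs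

def classify_output_positions_alt (output_str : String) : List String :=
  pvAltGo false output_str.toList

-- ===== PRECONDITION & SPEC =====
def Spec_classify_output_positions (output_str : String) (out : List String) : Prop := out = classify_output_positions_alt output_str
instance (output_str : String) (out : List String) : Decidable (Spec_classify_output_positions output_str out) := by unfold Spec_classify_output_positions; infer_instance

-- ===== CLAIM (what is proved, stated in full; the proofs are below) =====
def Claim_equal_classify_output_positions : Prop := ∀ (output_str : String), Dom_classify_output_positions output_str → Spec_classify_output_positions output_str (classify_output_positions output_str)

-- ===== LEMMAS AND PROOFS =====

/-- Proof-side model of `PySem.Chars.splitOn · [',']`. -/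
def pvSplit : List Char → List (List Char)
  | [] => [[]]
  | c :: cs => if c = ',' then [] :: pvSplit cs else (pvSplit cs).modifyHead (c :: ·)

lemma pvSplit_ne_nil (cs : List Char) : pvSplit cs ≠ [] := by
  cases cs with
  | nil => simp [pvSplit]
  | cons c cs =>
    simp only [pvSplit]
    split_ifs
    · simp
    · cases h : pvSplit cs with
      | nil => exact absurd h (pvSplit_ne_nil cs)
      | cons a t => simp [List.modifyHead]

lemma modifyHead_comp {α : Type} (l : List α) (f g : α → α) (h : l ≠ []) :
    (l.modifyHead g).modifyHead f = l.modifyHead (fun x => f (g x)) := by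
  cases l with
  | nil => simp at h
  | cons a t => simp [List.modifyHead]

lemma modifyHead_fun_id {α : Type} (l : List α) : l.modifyHead (fun x => x) = l := by
  cases l <;> simp [List.modifyHead]

lemma splitOn_go_eq (fuel : Nat) (l cur : List Char) (acc : List (List Char))
    (h : l.length < fuel) :
    PySem.Chars.splitOn.go [','] fuel l cur acc
      = acc.reverse ++ (pvSplit l).modifyHead (cur.reverse ++ ·) := by
  induction fuel generalizing l cur acc with
  | zero => omega
  | succ f ih =>
    cases l with
    | nil => simp [PySem.Chars.splitOn.go, pvSplit, List.modifyHead]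
    | cons c rest =>
      by_cases hc : c = ','
      · subst hc
        have hpre : [','].isPrefixOf (',' :: rest) = true := by simp [List.isPrefixOf]
        have hd : List.drop [','].length (',' :: rest) = rest := by simp
        simp only [PySem.Chars.splitOn.go, hpre, if_pos, hd]
        rw [ih rest [] (cur.reverse :: acc) (by simp at h; omega)]
        cases hsp : pvSplit rest with
        | nil => exact absurd hsp (pvSplit_ne_nil rest)
        | cons a t => simp [pvSplit, hsp, List.modifyHead]
      · have hpre : [','].isPrefixOf (c :: rest) = false := by
          simp [List.isPrefixOf]
          exact fun hh => hc hh.symm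
        simp only [PySem.Chars.splitOn.go, hpre, Bool.false_eq_true, if_false]
        rw [ih rest (c :: cur) acc (by simp at h; omega)]
        simp only [pvSplit, if_neg hc]
        rw [modifyHead_comp _ _ _ (pvSplit_ne_nil rest)]
        simp

lemma splitOn_eq_pvSplit (cs : List Char) :
    PySem.Chars.splitOn cs [','] = pvSplit cs := by
  have := splitOn_go_eq (cs.length + 1) cs [] [] (by omega)
  rw [PySem.Chars.splitOn, this]
  simp only [List.reverse_nil, List.nil_append]
  exact modifyHead_fun_id _

lemma find_go_ge (cs : List Char) (k : Nat) :
    PySem.Chars.find.go ['='] cs k = -1 ∨ (k : Int) ≤ PySem.Chars.find.go ['='] cs k := by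
  induction cs generalizing k with
  | nil => left; simp [PySem.Chars.find.go]
  | cons c cs ih =>
    simp only [PySem.Chars.find.go]
    split_ifs
    · right; omega
    · rcases ih (k + 1) with h | h
      · left; exact h
      · right; omega

/-- `find.go` with a shifted start index. -/
lemma find_go_shift (cs : List Char) (k : Nat) :
    PySem.Chars.find.go ['='] cs k
      = if PySem.Chars.find.go ['='] cs 0 = -1 then -1
        else PySem.Chars.find.go ['='] cs 0 + k := by
  induction cs generalizing k with
  | nil => simp [PySem.Chars.find.go]
  | cons c cs ih =>
    by_cases hc : c = '='
    · subst hc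
      have hpre : ['='].isPrefixOf ('=' :: cs) = true := by simp [List.isPrefixOf]
      simp only [PySem.Chars.find.go, hpre, if_pos]
      norm_num
    · have hpre : ['='].isPrefixOf (c :: cs) = false := by
        simp [List.isPrefixOf]
        exact fun hh => hc hh.symm
      simp only [PySem.Chars.find.go, hpre, Bool.false_eq_true, if_false]
      rw [ih (k + 1), ih 1]
      by_cases h1 : PySem.Chars.find.go ['='] cs 0 = -1
      · simp [h1]
      · have hge : (0 : Int) ≤ PySem.Chars.find.go ['='] cs 0 := by
          rcases find_go_ge cs 0 with h | h
          · exact absurd h h1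
          · exact h
        rw [if_neg h1, if_neg h1, if_neg (by omega)]
        push_cast; ring

lemma find_cons_self (cs : List Char) : PySem.Chars.find ('=' :: cs) ['='] = 0 := by
  have hpre : ['='].isPrefixOf ('=' :: cs) = true := by simp [List.isPrefixOf]
  simp [PySem.Chars.find, PySem.Chars.find.go, hpre]

lemma find_cons_ne (c : Char) (cs : List Char) (hc : c ≠ '=') :
    PySem.Chars.find (c :: cs) ['='] =
      if PySem.Chars.find cs ['='] = -1 then -1 else PySem.Chars.find cs ['='] + 1 := by
  have hpre : ['='].isPrefixOf (c :: cs) = false := by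
    simp [List.isPrefixOf]
    exact fun hh => hc hh.symm
  simp only [PySem.Chars.find, PySem.Chars.find.go, hpre, Bool.false_eq_true, if_false]
  exact find_go_shift cs 1

lemma find_nonneg_of_ne (cs : List Char) (h : PySem.Chars.find cs ['='] ≠ -1) :
    0 ≤ PySem.Chars.find cs ['='] := by
  have := PySem.Chars.neg_one_le_find cs ['=']
  omega

lemma find_eq_neg_one_iff_not_mem (p : List Char) :
    PySem.Chars.find p ['='] = -1 ↔ '=' ∉ p := by
  rw [PySem.Chars.find_eq_neg_one_iff]
  constructor
  · intro h hm
    obtain ⟨s1, t1, rfl⟩ := List.append_of_mem hm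
    exact h ⟨s1, t1, by simp⟩
  · intro h hinf
    exact h (List.singleton_sublist.mp hinf.sublist)

/-- A's per-segment output. -/
def pvSeg (step : List Char) : List String :=
  let eq_pos := PySem.Chars.find step ['=']
  if eq_pos < 0 then List.replicate step.length "plan"
  else List.replicate eq_pos.toNat "plan" ++ ["sep"]
         ++ List.replicate (step.length - eq_pos.toNat - 1) "calc"

def pvSepJoin : List (List Char) → List String
  | [] => []
  | [s] => pvSeg s
  | s :: rest => pvSeg s ++ "sep" :: pvSepJoin rest

lemma pvAltGo_true (p t : List Char) (h : ',' ∉ p) :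
    pvAltGo true (p ++ t) = List.replicate p.length "calc" ++ pvAltGo true t := by
  induction p with
  | nil => simp
  | cons c p ih =>
    have hc : c ≠ ',' := by intro hh; subst hh; exact h List.mem_cons_self
    have hp : ',' ∉ p := fun hm => h (List.mem_cons_of_mem _ hm)
    simp [pvAltGo, hc, ih hp, List.replicate_succ]

lemma pvAltGo_seg (p t : List Char) (h : ',' ∉ p) :
    pvAltGo false (p ++ t) = pvSeg p ++ pvAltGo (decide ('=' ∈ p)) t := by
  induction p with
  | nil => simp [pvSeg, PySem.Chars.find, PySem.Chars.find.go]
  | cons c p ih =>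
    have hc : c ≠ ',' := by intro hh; subst hh; exact h List.mem_cons_self
    have hp : ',' ∉ p := fun hm => h (List.mem_cons_of_mem _ hm)
    by_cases he : c = '='
    · subst he
      simp only [List.cons_append, pvAltGo, if_neg hc]
      rw [if_pos (by simp), pvAltGo_true p t hp]
      simp [pvSeg, find_cons_self, List.replicate_succ]
    · have he' : ¬('=' = c) := fun hh => he hh.symm
      have hfind := find_cons_ne c p he
      simp only [List.cons_append, pvAltGo, if_neg hc]
      rw [if_neg (by simp [he]), if_neg (by simp), ih hp]
      by_cases h1 : PySem.Chars.find p ['='] = -1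
      · have hnm : '=' ∉ p := (find_eq_neg_one_iff_not_mem p).mp h1
        simp [pvSeg, hfind, h1, List.replicate_succ, he', hnm]
      · have h0 : 0 ≤ PySem.Chars.find p ['='] := find_nonneg_of_ne p h1
        have hmem : '=' ∈ p := by
          by_contra hnm
          exact h1 ((find_eq_neg_one_iff_not_mem p).mpr hnm)
        simp only [pvSeg, hfind, if_neg h1]
        rw [if_neg (by omega), if_neg (by omega)]
        have ht : (PySem.Chars.find p ['='] + 1).toNat = (PySem.Chars.find p ['=']).toNat + 1 := by omega
        simp [ht, List.replicate_succ, he', hmem]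

lemma pvFoldA (l : List (List Char)) (i N : Int) (acc : List String)
    (hN : i + l.length = N) (hl : l ≠ []) :
    (PySem.List.enumerate l i).foldl (fun types p =>
      let si := p.1
      let step := p.2
      let eq_pos := PySem.Chars.find step ['=']
      let types :=
        if eq_pos < 0 then types ++ List.replicate step.length "plan"
        else types ++ List.replicate eq_pos.toNat "plan" ++ ["sep"]
               ++ List.replicate (step.length - eq_pos.toNat - 1) "calc"
      if si < N - 1 then types ++ ["sep"] else types) acc
    = acc ++ pvSepJoin l := by
  induction l generalizing i acc with
  | nil => simp at hl
  | cons s rest ih =>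
    rw [PySem.List.enumerate_cons]
    simp only [List.foldl_cons]
    cases rest with
    | nil =>
      have hi : ¬ (i < N - 1) := by simp at hN; omega
      simp only [hi, if_false, PySem.List.enumerate_nil, List.foldl_nil, pvSepJoin, pvSeg]
      split_ifs <;> simp
    | cons r rs =>
      have hi : i < N - 1 := by simp at hN; push_cast at hN; omega
      rw [ih (i + 1) _ (by simp at hN ⊢; push_cast at hN ⊢; omega) (by simp)]
      simp only [hi, if_true]
      show _ = acc ++ (pvSeg s ++ "sep" :: pvSepJoin (r :: rs))
      split_ifs <;> simp [pvSeg, *]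

lemma pvMain (cs pre : List Char) (h : ',' ∉ pre) :
    pvAltGo false (pre ++ cs) = pvSepJoin ((pvSplit cs).modifyHead (pre ++ ·)) := by
  induction cs generalizing pre with
  | nil =>
    simp only [pvSplit, List.modifyHead, List.append_nil]
    have := pvAltGo_seg pre [] h
    simpa [pvSepJoin, pvAltGo] using this
  | cons c cs ih =>
    by_cases hc : c = ','
    · subst hc
      simp only [pvSplit, if_pos rfl, List.modifyHead, List.append_nil]
      have h1 := pvAltGo_seg pre (',' :: cs) h
      rw [h1]
      simp only [pvAltGo, if_pos rfl]
      have h2 := ih [] (by simp)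
      simp only [List.nil_append] at h2
      rw [h2, modifyHead_fun_id]
      cases hsp : pvSplit cs with
      | nil => exact absurd hsp (pvSplit_ne_nil cs)
      | cons a t =>
        cases t <;> simp [pvSepJoin]
    · have h2 := ih (pre ++ [c]) (by intro hm; rcases List.mem_append.mp hm with hm | hm; exact h hm; exact hc (List.mem_singleton.mp hm).symm)
      rw [List.append_assoc] at h2
      simp only [List.singleton_append] at h2
      rw [h2]
      simp only [pvSplit, if_neg hc]
      rw [modifyHead_comp _ _ _ (pvSplit_ne_nil cs)]
      congr 2
      funext x
      simp

-- ===== VERDICT (by name: the statement is the Claim_ definition above) =====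
theorem classify_output_positions_spec : Claim_equal_classify_output_positions := by
  intro s _hd
  show classify_output_positions s = classify_output_positions_alt s
  unfold classify_output_positions classify_output_positions_alt
  rw [splitOn_eq_pvSplit]
  rw [pvFoldA (pvSplit s.toList) 0 (pvSplit s.toList).length [] (by simp) (pvSplit_ne_nil _)]
  rw [List.nil_append]
  have := pvMain s.toList [] (by simp)
  simp only [List.nil_append] at this
  rw [modifyHead_fun_id] at this
  exact this.symm
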